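-- pv_equiv track=rewrite | github.com/ForYouPage-Org/aies_041926_mental_health | analysis/phq4_detection_probe_rq3_v3.py | build_messages_block
-- ===== SOURCE A (Python) =====
-- def build_messages_block(msgs: list[str], max_chars: int) -> str:
--     out, used = [], 0
--     for m in msgs:
--         line = f"- {m.strip()}"
--         if used + len(line) + 2 > max_chars:
--             break
--         out.append(line)
--         used += len(line) + 2
--     return "\n".join(out)
-- ===== SOURCE B (Python) =====
-- def build_messages_block(msgs: list[str], max_chars: int) -> str:
--     # build the full table of formatted lines, then the running totals,
--     # then slice at the count of totals within budget (totals are strictly increasing)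
--     lines = ["- " + m.strip() for m in msgs]
--     totals = []
--     run = 0
--     for l in lines:
--         run += len(l) + 2
--         totals.append(run)
--     cutoff = sum(1 for t in totals if t <= max_chars)
--     return "\n".join(lines[:cutoff])
-- ===== Notes on version B (the rewrite author's own statement) =====
-- stated objective: alternative
-- what changed: Replaces the interleaved accumulate-and-break loop with a build-table-then-slice decomposition: format all lines, compute running totals, count the totals within budget (valid because totals are strictly increasing), and join that prefix.
import Mathlib
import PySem

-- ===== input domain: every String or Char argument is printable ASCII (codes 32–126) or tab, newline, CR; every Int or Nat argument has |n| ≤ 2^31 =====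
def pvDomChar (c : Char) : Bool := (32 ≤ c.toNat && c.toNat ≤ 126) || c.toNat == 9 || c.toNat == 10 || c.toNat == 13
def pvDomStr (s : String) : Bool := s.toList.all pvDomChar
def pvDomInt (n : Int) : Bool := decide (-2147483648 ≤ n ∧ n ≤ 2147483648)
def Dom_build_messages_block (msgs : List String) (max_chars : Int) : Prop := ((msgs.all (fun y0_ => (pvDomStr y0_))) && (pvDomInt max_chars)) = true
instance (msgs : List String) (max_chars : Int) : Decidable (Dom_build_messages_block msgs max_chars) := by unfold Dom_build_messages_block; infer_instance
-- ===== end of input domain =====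

-- B changes the decomposition (build all lines and running totals, then slice) — same value, same cost.

-- ===== PORT A =====
-- the for-loop with `break`, as structural recursion over msgs carrying `used`
def buildA (max_chars : Int) (used : Int) : List String → List String
  | [] => []
  | m :: rest =>
      let line := "- " ++ PySem.Str.strip m
      if used + PySem.Str.len line + 2 > max_chars then []
      else line :: buildA max_chars (used + PySem.Str.len line + 2) rest

def build_messages_block (msgs : List String) (max_chars : Int) : String :=
  PySem.Str.join "\n" (buildA max_chars 0 msgs)

-- ===== PORT B =====
-- running totals of len(line)+2, as in Source B's accumulate loop
def totalsB (run : Int) : List String → List Int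
  | [] => []
  | l :: rest => (run + PySem.Str.len l + 2) :: totalsB (run + PySem.Str.len l + 2) rest

def build_messages_block_alt (msgs : List String) (max_chars : Int) : String :=
  let lines := msgs.map (fun m => "- " ++ PySem.Str.strip m)
  let totals := totalsB 0 lines
  let cutoff := totals.countP (fun t => t ≤ max_chars)
  PySem.Str.join "\n" (lines.take cutoff)

-- ===== PRECONDITION & SPEC =====
def Spec_build_messages_block (msgs : List String) (max_chars : Int) (out : String) : Prop := out = build_messages_block_alt msgs max_chars
instance (msgs : List String) (max_chars : Int) (out : String) : Decidable (Spec_build_messages_block msgs max_chars out) := by unfold Spec_build_messages_block; infer_instance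

-- ===== CLAIM (what is proved, stated in full; the proofs are below) =====
def Claim_equal_build_messages_block : Prop := ∀ (msgs : List String) (max_chars : Int), Dom_build_messages_block msgs max_chars → Spec_build_messages_block msgs max_chars (build_messages_block msgs max_chars)

-- ===== LEMMAS AND PROOFS =====

-- every running total in totalsB run L exceeds a budget the starting run already exceeds
theorem totalsB_countP_zero (max_chars : Int) (L : List String) :
    ∀ run, max_chars < run → (totalsB run L).countP (fun t => t ≤ max_chars) = 0 := by
  induction L with
  | nil => intro run _; simp [totalsB]
  | cons l rest ih =>
      intro run h
      have hlen : (0 : Int) ≤ PySem.Str.len l := by simp [PySem.Str.len_eq]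
      have h' : max_chars < run + PySem.Str.len l + 2 := by omega
      rw [totalsB, List.countP_cons, ih _ h', if_neg (by simpa using not_le.mpr h')]

theorem buildA_eq_take (max_chars : Int) (msgs : List String) :
    ∀ used, buildA max_chars used msgs =
      (msgs.map (fun m => "- " ++ PySem.Str.strip m)).take
        ((totalsB used (msgs.map (fun m => "- " ++ PySem.Str.strip m))).countP
          (fun t => t ≤ max_chars)) := by
  induction msgs with
  | nil => intro used; simp [buildA, totalsB]
  | cons m rest ih =>
      intro used
      simp only [buildA, List.map_cons, totalsB, List.countP_cons]
      by_cases h : used + PySem.Str.len ("- " ++ PySem.Str.strip m) + 2 ≤ max_chars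
      · rw [if_neg (by omega), if_pos (by simpa using h), List.take_succ_cons, ih]
      · have hgt : used + PySem.Str.len ("- " ++ PySem.Str.strip m) + 2 > max_chars := by omega
        rw [if_pos hgt,
          totalsB_countP_zero max_chars _ _ hgt,
          if_neg (by simpa using not_le.mpr hgt)]
        simp

-- ===== VERDICT (by name: the statement is the Claim_ definition above) =====
theorem build_messages_block_spec : Claim_equal_build_messages_block := by
  intro msgs max_chars _
  unfold Spec_build_messages_block build_messages_block build_messages_block_alt
  rw [buildA_eq_take]
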